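-- pv_equiv track=rewrite | github.com/vildan-valeev/tutorials | simple_pig_latin.py | ttt
-- ===== SOURCE A (Python) =====
-- def ttt(text):
--     result = []
--     for i in text.split():
--         tmp_word = ''
--         tmp = ''
--         for s in i:
--             if s.isalpha() and not tmp:
--                 tmp = s
--             else:
--                 tmp_word += s
--         if i.isalpha():
--             result.append(tmp_word + tmp + "ay")
--         else:
--             result.append(tmp_word + tmp)
--     return " ".join(result)
-- ===== SOURCE B (Python) =====
-- def ttt(text):
--     out = []
--     for w in text.split():
--         hit = next(((k, c) for k, c in enumerate(w) if c.isalpha()), None)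
--         if hit is None:
--             out.append(w)
--         else:
--             k, c = hit
--             moved = w[:k] + w[k+1:] + c
--             out.append(moved + "ay" if w.isalpha() else moved)
--     return " ".join(out)
-- ===== Notes on version B (the rewrite author's own statement) =====
-- stated objective: faster
-- what changed: Replaces A's two-accumulator character loop (building tmp_word by repeated one-char string concatenation) with a find-first-alpha-index then slice-and-concatenate pass per word.
import Mathlib
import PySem

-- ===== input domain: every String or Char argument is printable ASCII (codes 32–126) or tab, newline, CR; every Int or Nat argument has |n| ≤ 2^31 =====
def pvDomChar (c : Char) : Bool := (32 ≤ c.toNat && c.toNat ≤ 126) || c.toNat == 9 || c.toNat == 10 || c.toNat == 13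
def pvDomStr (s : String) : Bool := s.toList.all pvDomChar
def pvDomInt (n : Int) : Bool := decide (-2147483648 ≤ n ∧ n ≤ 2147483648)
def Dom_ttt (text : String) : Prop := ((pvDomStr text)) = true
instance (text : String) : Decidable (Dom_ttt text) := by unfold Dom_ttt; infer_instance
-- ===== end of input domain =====

-- B replaces A's two-accumulator char loop with find-first-alpha-index + slices (avoids per-char string concatenation; a timing run measured B faster).

-- ===== PORT A =====
-- inner char loop of A: state (tmp_word, tmp)
def tttAStep (st : List Char × List Char) (s : Char) : List Char × List Char :=
  if PySem.Chars.isalpha s && st.2.isEmpty then (st.1, [s]) else (st.1 ++ [s], st.2)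

def tttAWord (w : List Char) : List Char :=
  let p := w.foldl tttAStep ([], [])
  if PySem.Chars.strIsalpha w then p.1 ++ p.2 ++ "ay".toList else p.1 ++ p.2

def ttt (text : String) : String :=
  String.ofList (PySem.Chars.join [' '] ((PySem.Chars.split₀ text.toList).map tttAWord))

-- ===== PORT B =====
def tttBWord (w : List Char) : List Char :=
  match (PySem.List.enumerate w).find? (fun p => PySem.Chars.isalpha p.2) with
  | none => w
  | some (k, c) =>
      let moved := PySem.List.slice w none (some k) ++ PySem.List.slice w (some (k + 1)) none ++ [c]
      if PySem.Chars.strIsalpha w then moved ++ "ay".toList else moved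

def ttt_alt (text : String) : String :=
  String.ofList (PySem.Chars.join [' '] ((PySem.Chars.split₀ text.toList).map tttBWord))

-- ===== PRECONDITION & SPEC =====
def Spec_ttt (text : String) (out : String) : Prop := out = ttt_alt text
instance (text : String) (out : String) : Decidable (Spec_ttt text out) := by unfold Spec_ttt; infer_instance

-- ===== CLAIM (what is proved, stated in full; the proofs are below) =====
def Claim_equal_ttt : Prop := ∀ (text : String), Dom_ttt text → Spec_ttt text (ttt text)

-- ===== LEMMAS AND PROOFS =====

-- split a word at its first alphabetic character
def sfa : List Char → Option (List Char × Char × List Char)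
  | [] => none
  | x :: xs =>
      if PySem.Chars.isalpha x then some ([], x, xs)
      else (sfa xs).map (fun t => (x :: t.1, t.2.1, t.2.2))

theorem sfa_some (w p : List Char) (c : Char) (s : List Char)
    (h : sfa w = some (p, c, s)) :
    w = p ++ c :: s ∧ PySem.Chars.isalpha c = true ∧
      (∀ x ∈ p, PySem.Chars.isalpha x = false) := by
  induction w generalizing p with
  | nil => simp [sfa] at h
  | cons x xs ih =>
      by_cases hx : PySem.Chars.isalpha x
      · simp only [sfa, hx, if_true, Option.some.injEq, Prod.mk.injEq] at h
        obtain ⟨rfl, rfl, rfl⟩ := h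
        simp [hx]
      · simp only [sfa, hx, Bool.false_eq_true, if_false] at h
        cases hs : sfa xs with
        | none => rw [hs] at h; simp at h
        | some t =>
            obtain ⟨p', c', s'⟩ := t
            rw [hs] at h
            simp only [Option.map_some, Option.some.injEq, Prod.mk.injEq] at h
            obtain ⟨h1, h2, h3⟩ := h
            subst h2 h3
            obtain ⟨hw, hc, hp⟩ := ih p' hs
            refine ⟨?_, hc, ?_⟩
            · rw [← h1]; simp [hw]
            · intro y hy
              rw [← h1] at hy
              rcases List.mem_cons.mp hy with rfl | hy'
              · simpa using hx
              · exact hp y hy'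

theorem sfa_ne_none (w : List Char) (x : Char) (hx : x ∈ w)
    (hxa : PySem.Chars.isalpha x = true) : sfa w ≠ none := by
  induction w with
  | nil => simp at hx
  | cons y ys ih =>
      by_cases hy : PySem.Chars.isalpha y
      · simp [sfa, hy]
      · simp only [sfa, hy, Bool.false_eq_true, if_false, ne_eq,
          Option.map_eq_none_iff]
        rcases List.mem_cons.mp hx with rfl | hx'
        · exact absurd hxa (by simp [hy])
        · exact ih hx'

theorem strIsalpha_false (w : List Char)
    (h : ∀ c ∈ w, PySem.Chars.isalpha c = false) :
    PySem.Chars.strIsalpha w = false := by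
  unfold PySem.Chars.strIsalpha
  cases w with
  | nil => simp
  | cons x xs => simp [h x (by simp)]

-- once tmp is nonempty A's loop only appends
theorem foldl_step_full (w a : List Char) (c : Char) :
    w.foldl tttAStep (a, [c]) = (a ++ w, [c]) := by
  induction w generalizing a with
  | nil => simp
  | cons x xs ih => simp [tttAStep, ih]

theorem foldl_step_none (w a : List Char)
    (h : ∀ c ∈ w, PySem.Chars.isalpha c = false) :
    w.foldl tttAStep (a, []) = (a ++ w, []) := by
  induction w generalizing a with
  | nil => simp
  | cons x xs ih =>
      simp only [List.foldl_cons, tttAStep, h x (by simp), Bool.false_and,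
        Bool.false_eq_true, if_false]
      rw [ih (a ++ [x]) (fun c hc => h c (by simp [hc]))]
      simp

theorem foldl_step_some (w p : List Char) (c : Char) (s : List Char)
    (h : sfa w = some (p, c, s)) (a : List Char) :
    w.foldl tttAStep (a, []) = (a ++ p ++ s, [c]) := by
  induction w generalizing p a with
  | nil => simp [sfa] at h
  | cons x xs ih =>
      by_cases hx : PySem.Chars.isalpha x
      · simp only [sfa, hx, if_true, Option.some.injEq, Prod.mk.injEq] at h
        obtain ⟨rfl, rfl, rfl⟩ := h
        simp [tttAStep, hx, foldl_step_full]
      · simp only [sfa, hx, Bool.false_eq_true, if_false] at h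
        cases hs : sfa xs with
        | none => rw [hs] at h; simp at h
        | some t =>
            obtain ⟨p', c', s'⟩ := t
            rw [hs] at h
            simp only [Option.map_some, Option.some.injEq, Prod.mk.injEq] at h
            obtain ⟨h1, h2, h3⟩ := h
            subst h2 h3
            simp only [List.foldl_cons, tttAStep, hx, Bool.false_and,
              Bool.false_eq_true, if_false]
            rw [ih p' hs (a ++ [x]), ← h1]
            simp

-- B's index search, characterized by sfa
theorem find_enum_none (w : List Char) (s0 : Int)
    (h : ∀ c ∈ w, PySem.Chars.isalpha c = false) :
    (PySem.List.enumerate w s0).find? (fun p => PySem.Chars.isalpha p.2) = none := by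
  induction w generalizing s0 with
  | nil => simp [PySem.List.enumerate_nil]
  | cons x xs ih =>
      rw [PySem.List.enumerate_cons, List.find?_cons_of_neg (by simp [h x (by simp)])]
      exact ih (s0 + 1) (fun c hc => h c (by simp [hc]))

theorem find_enum_some (w p : List Char) (c : Char) (s : List Char)
    (h : sfa w = some (p, c, s)) (s0 : Int) :
    (PySem.List.enumerate w s0).find? (fun p => PySem.Chars.isalpha p.2)
      = some (s0 + p.length, c) := by
  induction w generalizing p s0 with
  | nil => simp [sfa] at h
  | cons x xs ih =>
      by_cases hx : PySem.Chars.isalpha x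
      · simp only [sfa, hx, if_true, Option.some.injEq, Prod.mk.injEq] at h
        obtain ⟨rfl, rfl, rfl⟩ := h
        rw [PySem.List.enumerate_cons, List.find?_cons_of_pos (by simp [hx])]
        simp
      · simp only [sfa, hx, Bool.false_eq_true, if_false] at h
        cases hs : sfa xs with
        | none => rw [hs] at h; simp at h
        | some t =>
            obtain ⟨p', c', s'⟩ := t
            rw [hs] at h
            simp only [Option.map_some, Option.some.injEq, Prod.mk.injEq] at h
            obtain ⟨h1, h2, h3⟩ := h
            subst h2 h3
            rw [PySem.List.enumerate_cons,
              List.find?_cons_of_neg (by simp [hx]), ih p' hs (s0 + 1), ← h1]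
            simp
            ring

theorem word_eq (w : List Char) : tttAWord w = tttBWord w := by
  cases h : sfa w with
  | none =>
      have hall : ∀ c ∈ w, PySem.Chars.isalpha c = false := by
        intro x hx
        cases hxa : PySem.Chars.isalpha x
        · rfl
        · exact absurd h (sfa_ne_none w x hx hxa)
      unfold tttAWord tttBWord
      rw [foldl_step_none w [] hall, find_enum_none w 0 hall,
        strIsalpha_false w hall]
      simp
  | some t =>
      obtain ⟨p, c, s⟩ := t
      obtain ⟨hw, hc, hp⟩ := sfa_some w p c s h
      unfold tttAWord tttBWord
      rw [foldl_step_some w p c s h [], find_enum_some w p c s h 0]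
      simp only [zero_add]
      have hk : ((p.length : Int)) + 1 = (((p.length + 1 : Nat) : Int)) := by push_cast; ring
      rw [hk, PySem.List.slice_to_natCast, PySem.List.slice_from_natCast]
      have htake : w.take p.length = p := by simp [hw]
      have hdrop : w.drop (p.length + 1) = s := by
        rw [hw, show p ++ c :: s = (p ++ [c]) ++ s by simp]
        simp
      rw [htake, hdrop]
      by_cases ha : PySem.Chars.strIsalpha w
      · simp [ha]
      · simp [ha]

-- ===== VERDICT (by name: the statement is the Claim_ definition above) =====
theorem ttt_spec : Claim_equal_ttt := by
  intro text _
  unfold Spec_ttt ttt ttt_alt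
  rw [show tttAWord = tttBWord from funext word_eq]
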